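-- pv_equiv track=rewrite | github.com/dqlynch/euler | 98/98.py | common_form
-- ===== SOURCE A (Python) =====
-- def common_form(word):
--     increment = 'A'
--     letter_map = {}
--     common_word = ''
--     for letter in word:
--         if not letter_map.get(letter):
--             letter_map[letter] = increment
--             increment = chr(ord(increment) + 1)
--         common_word += str(letter_map.get(letter))
--     return common_word, letter_map
-- ===== SOURCE B (Python) =====
-- def common_form(word):
--     # Closed-form per-character rule: the pattern letter of c is 'A' shifted by
--     # the number of distinct letters occurring strictly before c's first
--     # occurrence.  No incremental map is maintained; the letter map is then
--     # read off the translation itself via dict(zip(...)) (first-appearance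
--     # key order, values overwritten with the identical value).
--     common_word = ''.join(
--         chr(ord('A') + len(set(word[:word.index(c)]))) for c in word)
--     letter_map = dict(zip(word, common_word))
--     return common_word, letter_map
-- ===== Notes on version B (the rewrite author's own statement) =====
-- stated objective: alternative
-- what changed: Replaces A's single stateful loop (growing a dict, advancing an increment character, concatenating output) with a stateless closed-form rule: each character's pattern letter is chr(65 + number of distinct letters before its first occurrence), computed independently per position via index/set on a prefix slice, and the letter map is derived afterwards from dict(zip(word, common_word)); no incremental state is maintained.
import Mathlib
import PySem

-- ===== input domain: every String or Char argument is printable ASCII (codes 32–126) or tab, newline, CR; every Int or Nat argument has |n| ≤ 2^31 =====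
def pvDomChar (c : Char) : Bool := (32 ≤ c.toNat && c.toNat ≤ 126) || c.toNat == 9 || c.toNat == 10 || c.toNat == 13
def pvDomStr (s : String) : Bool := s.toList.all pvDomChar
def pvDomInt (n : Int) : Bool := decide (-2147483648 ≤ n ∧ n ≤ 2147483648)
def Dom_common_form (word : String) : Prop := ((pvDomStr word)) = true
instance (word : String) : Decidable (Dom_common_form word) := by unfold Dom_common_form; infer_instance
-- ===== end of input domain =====

-- B replaces A's single stateful loop (dict growth + increment char + concatenation) by a
-- stateless closed-form rule per character plus a dict(zip(..)) for the map; alternative, not faster.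

-- ===== PORT A =====
-- literal port of A's interleaved loop; Python's falsy test 'not letter_map.get(letter)'
-- holds exactly when the key is absent or mapped to "" (getD ""), and str(v) of the
-- stored one-char string v is v itself ('str(None)' = "None" is unreachable but kept).
def common_form (word : String) : String × (List (String × String)) :=
  let fin := word.toList.foldl
    (fun (st : Char × PySem.Dict String String × String) (letter : Char) =>
      let key := String.ofList [letter]
      let st' :=
        if ((st.2.1.get? key).getD "") = "" then
          (Char.ofNat (st.1.toNat + 1), st.2.1.insert key (String.ofList [st.1]))
        else (st.1, st.2.1)
      (st'.1, st'.2, st.2.2 ++ ((st'.2.get? key).getD "None")))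
    ('A', PySem.Dict.empty, "")
  (fin.2.2, fin.2.1.items)

-- ===== PORT B =====
-- literal port of B: per character c, chr(ord('A') + len(set(word[:word.index(c)]))) —
-- word.index(c) is PySem.List.index? on the chars (always a hit, so the getD 0 default
-- never fires; Python's ValueError is unreachable), the slice is take, set is PySem.Set;
-- then letter_map = dict(zip(word, common_word)) as a fold of Dict.insert over the zip.
def common_form_alt (word : String) : String × (List (String × String)) :=
  let cs := word.toList
  let cw := PySem.Str.join "" (cs.map (fun c =>
    String.ofList [Char.ofNat (65 + (PySem.Set.ofList
      (cs.take ((PySem.List.index? cs c).getD 0))).length)]))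
  let letter_map := (cs.zip cw.toList).foldl
    (fun (d : PySem.Dict String String) p =>
      d.insert (String.ofList [p.1]) (String.ofList [p.2]))
    PySem.Dict.empty
  (cw, letter_map.items)

-- ===== PRECONDITION & SPEC =====
def Spec_common_form (word : String) (out : String × (List (String × String))) : Prop := out = common_form_alt word
instance (word : String) (out : String × (List (String × String))) : Decidable (Spec_common_form word out) := by unfold Spec_common_form; infer_instance

-- ===== CLAIM (what is proved, stated in full; the proofs are below) =====
def Claim_equal_common_form : Prop := ∀ (word : String), Dom_common_form word → Spec_common_form word (common_form word)

-- ===== LEMMAS AND PROOFS =====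

-- A's loop body as a named function (definitionally the lambda inside common_form)
def pvStep : (Char × PySem.Dict String String × String) → Char → (Char × PySem.Dict String String × String) :=
  fun st letter =>
    let key := String.ofList [letter]
    let st' :=
      if ((st.2.1.get? key).getD "") = "" then
        (Char.ofNat (st.1.toNat + 1), st.2.1.insert key (String.ofList [st.1]))
      else (st.1, st.2.1)
    (st'.1, st'.2, st.2.2 ++ ((st'.2.get? key).getD "None"))

theorem common_form_eq_foldl (word : String) :
    common_form word =
      (let fin := word.toList.foldl pvStep ('A', PySem.Dict.empty, "")
       (fin.2.2, fin.2.1.items)) := rfl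

-- the value assigned to the k-th distinct letter
def pvVal (k : Nat) : String := String.ofList [Char.ofNat (65 + k)]

-- the letter map of an ordered list of distinct letters, indices starting at k
def pvMap (k : Nat) : List Char → List (String × String)
  | [] => []
  | c :: r => (String.ofList [c], pvVal k) :: pvMap (k + 1) r

-- the distinct letters of l in first-appearance order, appended to seen
def pvSeen (seen l : List Char) : List Char := l.foldl PySem.Set.add seen

theorem pvMap_append (s t : List Char) : ∀ k, pvMap k (s ++ t) = pvMap k s ++ pvMap (k + s.length) t := by
  induction s with
  | nil => intro k; simp [pvMap]
  | cons c r ih => intro k; simp [pvMap, ih (k + 1)]; ring_nf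

theorem pvKey_inj (c d : Char) : ((String.ofList [c] == String.ofList [d]) = true) ↔ c = d := by
  simp only [beq_iff_eq]
  constructor
  · intro h
    have := congrArg String.toList h
    simpa using this
  · intro h; rw [h]

theorem get?_pvMap_of_not_mem {c : Char} {s : List Char} (h : c ∉ s) : ∀ k,
    (PySem.Dict.mk (pvMap k s)).get? (String.ofList [c]) = none := by
  induction s with
  | nil => intro k; rfl
  | cons d r ih =>
    intro k
    rw [pvMap, PySem.Dict.get?_mk_cons, if_neg, ih (fun hm => h (List.mem_cons_of_mem d hm))]
    intro hb
    exact h (by simp [(pvKey_inj d c).mp hb])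

theorem get?_pvMap_mem {c : Char} {s : List Char} (h : c ∈ s) : ∀ k,
    ∃ ch : Char, (PySem.Dict.mk (pvMap k s)).get? (String.ofList [c]) = some (String.ofList [ch]) := by
  induction s with
  | nil => cases h
  | cons d r ih =>
    intro k
    rw [pvMap, PySem.Dict.get?_mk_cons]
    by_cases hb : (String.ofList [d] == String.ofList [c]) = true
    · exact ⟨Char.ofNat (65 + k), by rw [if_pos hb]; rfl⟩
    · have hm : c ∈ r := by
        rcases List.mem_cons.mp h with h' | h'
        · exact absurd ((pvKey_inj d c).mpr h'.symm) hb
        · exact h'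
      rw [if_neg hb]; exact ih hm (k + 1)

theorem get?_pvMap_prefix {c : Char} {s : List Char} (h : c ∈ s) (t : List Char) : ∀ k,
    (PySem.Dict.mk (pvMap k (s ++ t))).get? (String.ofList [c]) =
      (PySem.Dict.mk (pvMap k s)).get? (String.ofList [c]) := by
  induction s with
  | nil => cases h
  | cons d r ih =>
    intro k
    rw [List.cons_append, pvMap, pvMap, PySem.Dict.get?_mk_cons, PySem.Dict.get?_mk_cons]
    by_cases hb : (String.ofList [d] == String.ofList [c]) = true
    · rw [if_pos hb, if_pos hb]
    · have hm : c ∈ r := by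
        rcases List.mem_cons.mp h with h' | h'
        · exact absurd ((pvKey_inj d c).mpr h'.symm) hb
        · exact h'
      rw [if_neg hb, if_neg hb, ih hm (k + 1)]

-- first occurrence wins: a key absent from the prefix looks up its own entry
theorem get?_pvMap_first {c : Char} {s : List Char} (h : c ∉ s) (t : List Char) : ∀ k,
    (PySem.Dict.mk (pvMap k (s ++ c :: t))).get? (String.ofList [c]) = some (pvVal (k + s.length)) := by
  induction s with
  | nil =>
    intro k
    rw [List.nil_append, pvMap, PySem.Dict.get?_mk_cons, if_pos ((pvKey_inj c c).mpr rfl)]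
    simp
  | cons d r ih =>
    intro k
    rw [List.cons_append, pvMap, PySem.Dict.get?_mk_cons, if_neg,
        ih (fun hm => h (List.mem_cons_of_mem d hm))]
    · simp [List.length_cons]; ring_nf
    · intro hb
      exact h (by simp [(pvKey_inj d c).mp hb])

theorem pv_toNat_ofNat {n : Nat} (h : n < 55296) : (Char.ofNat n).toNat = n := by
  rw [Char.ofNat, dif_pos (Or.inl h)]
  simp [Char.ofNatAux, Char.toNat]

theorem pv_insert {c : Char} {s : List Char} (h : c ∉ s) :
    (PySem.Dict.mk (pvMap 0 s)).insert (String.ofList [c]) (pvVal s.length) =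
      PySem.Dict.mk (pvMap 0 (s ++ [c])) := by
  have hc : (PySem.Dict.mk (pvMap 0 s)).contains (String.ofList [c]) = false := by
    rw [PySem.Dict.contains_eq_isSome_get?, get?_pvMap_of_not_mem h 0]; rfl
  rw [PySem.Dict.insert, if_neg (by simp [hc])]
  rw [pvMap_append s [c] 0]
  show PySem.Dict.mk (pvMap 0 s ++ [(String.ofList [c], pvVal s.length)]) = _
  simp [pvMap, pvVal]

theorem pv_length_le {s : List Char} (hnd : s.Nodup) (hcode : ∀ c ∈ s, c.toNat ≤ 126) :
    s.length ≤ 127 := by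
  have hinj : Function.Injective Char.toNat := by
    intro a b h
    exact Char.ext (by exact UInt32.toNat_inj.mp h)
  have hnd' : (s.map Char.toNat).Nodup := hnd.map hinj
  have hsub : (s.map Char.toNat).toFinset ⊆ Finset.range 127 := by
    intro x hx
    rw [List.mem_toFinset, List.mem_map] at hx
    rcases hx with ⟨c, hc, rfl⟩
    exact Finset.mem_range.mpr (Nat.lt_succ_of_le (hcode c hc))
  have := Finset.card_le_card hsub
  rw [List.toFinset_card_of_nodup hnd', Finset.card_range, List.length_map] at this
  exact this

theorem pvSet_add_mem {s : List Char} {c : Char} (h : c ∈ s) : PySem.Set.add s c = s := by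
  simp [PySem.Set.add, PySem.Set.contains, h]

theorem pvSet_add_not_mem {s : List Char} {c : Char} (h : c ∉ s) : PySem.Set.add s c = s ++ [c] := by
  simp [PySem.Set.add, PySem.Set.contains, h]

theorem pvSeen_prefix (l : List Char) : ∀ s, s <+: pvSeen s l := by
  induction l with
  | nil => intro s; exact List.prefix_refl s
  | cons c r ih =>
    intro s
    have h1 : pvSeen s (c :: r) = pvSeen (PySem.Set.add s c) r := rfl
    rw [h1]
    refine List.IsPrefix.trans ?_ (ih (PySem.Set.add s c))
    by_cases hc : c ∈ s
    · rw [pvSet_add_mem hc]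
    · rw [pvSet_add_not_mem hc]; exact ⟨[c], rfl⟩

theorem pvSeen_mem {x : Char} (l : List Char) : ∀ s, x ∈ pvSeen s l ↔ x ∈ s ∨ x ∈ l := by
  induction l with
  | nil => intro s; simp [pvSeen]
  | cons c r ih =>
    intro s
    have h1 : pvSeen s (c :: r) = pvSeen (PySem.Set.add s c) r := rfl
    rw [h1, ih (PySem.Set.add s c)]
    by_cases hc : c ∈ s
    · rw [pvSet_add_mem hc]
      constructor
      · rintro (h | h)
        · exact Or.inl h
        · exact Or.inr (List.mem_cons_of_mem c h)
      · rintro (h | h)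
        · exact Or.inl h
        · rcases List.mem_cons.mp h with rfl | h'
          · exact Or.inl hc
          · exact Or.inr h'
    · rw [pvSet_add_not_mem hc]
      simp [List.mem_append, List.mem_cons, or_assoc, or_comm, or_left_comm]

theorem pvSeen_append (u v : List Char) (s : List Char) :
    pvSeen s (u ++ v) = pvSeen (pvSeen s u) v := by
  simp [pvSeen, List.foldl_append]

theorem chars_join_cons (l : List Char) (ls : List (List Char)) :
    PySem.Chars.join [] (l :: ls) = l ++ PySem.Chars.join [] ls := by
  cases ls <;> simp [PySem.Chars.join, List.intercalate, List.intersperse]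

theorem str_join_cons (x : String) (xs : List String) :
    PySem.Str.join "" (x :: xs) = x ++ PySem.Str.join "" xs := by
  simp only [PySem.Str.join, List.map_cons]
  have h : ("" : String).toList = [] := rfl
  rw [h, chars_join_cons, String.ofList_append, String.ofList_toList]

theorem pvOfList_ne_empty (ch : Char) : String.ofList [ch] ≠ "" := by
  intro h
  have := congrArg String.toList h
  simp at this

-- main loop invariant for A
theorem pv_loop (l : List Char) : ∀ (s : List Char) (cw : String),
    s.Nodup → (∀ c ∈ s, c.toNat ≤ 126) → (∀ c ∈ l, c.toNat ≤ 126) →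
    l.foldl pvStep (Char.ofNat (65 + s.length), PySem.Dict.mk (pvMap 0 s), cw)
      = (Char.ofNat (65 + (pvSeen s l).length), PySem.Dict.mk (pvMap 0 (pvSeen s l)),
         cw ++ PySem.Str.join "" (l.map
           (fun c => ((PySem.Dict.mk (pvMap 0 (pvSeen s l))).get? (String.ofList [c])).getD ""))) := by
  induction l with
  | nil =>
    intro s cw _ _ _
    show _ = (_, _, cw ++ PySem.Str.join "" [])
    have hj : PySem.Str.join "" ([] : List String) = "" := rfl
    rw [hj]
    simp [pvSeen]
  | cons c r ih =>
    intro s cw hnd hcode hl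
    have hcl : ∀ x ∈ r, x.toNat ≤ 126 := fun x hx => hl x (List.mem_cons_of_mem c hx)
    have hcc : c.toNat ≤ 126 := hl c List.mem_cons_self
    rw [List.foldl_cons]
    by_cases hc : c ∈ s
    · -- letter already seen: state unchanged, one value emitted
      obtain ⟨ch, hch⟩ := get?_pvMap_mem hc 0
      have hstep : pvStep (Char.ofNat (65 + s.length), PySem.Dict.mk (pvMap 0 s), cw) c
          = (Char.ofNat (65 + s.length), PySem.Dict.mk (pvMap 0 s), cw ++ String.ofList [ch]) := by
        unfold pvStep
        dsimp only
        rw [hch]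
        rw [if_neg (by simpa using pvOfList_ne_empty ch)]
        dsimp only
        rw [hch]
        rfl
      have hseen : pvSeen s (c :: r) = pvSeen s r := by
        show pvSeen (PySem.Set.add s c) r = pvSeen s r
        rw [pvSet_add_mem hc]
      rw [hstep, hseen, ih s (cw ++ String.ofList [ch]) hnd hcode hcl]
      obtain ⟨t, ht⟩ := pvSeen_prefix r s
      rw [List.map_cons, str_join_cons, ← ht, get?_pvMap_prefix hc t 0, hch]
      simp [String.append_assoc]
    · -- fresh letter: map and increment grow, its fresh value is emitted
      have hget : (PySem.Dict.mk (pvMap 0 s)).get? (String.ofList [c]) = none :=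
        get?_pvMap_of_not_mem hc 0
      have hlen : s.length ≤ 127 := pv_length_le hnd hcode
      have htn : (Char.ofNat (65 + s.length)).toNat = 65 + s.length :=
        pv_toNat_ofNat (by omega)
      have hval : (PySem.Dict.mk (pvMap 0 (s ++ [c]))).get? (String.ofList [c])
          = some (pvVal s.length) := by
        have := get?_pvMap_first hc [] 0
        simpa using this
      have hstep : pvStep (Char.ofNat (65 + s.length), PySem.Dict.mk (pvMap 0 s), cw) c
          = (Char.ofNat (65 + (s ++ [c]).length), PySem.Dict.mk (pvMap 0 (s ++ [c])),
             cw ++ pvVal s.length) := by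
        unfold pvStep
        dsimp only
        rw [hget]
        rw [if_pos (show (none : Option String).getD "" = "" from rfl)]
        dsimp only
        rw [show String.ofList [Char.ofNat (65 + s.length)] = pvVal s.length from rfl,
            pv_insert hc, hval, htn]
        have : 65 + s.length + 1 = 65 + (s ++ [c]).length := by simp; omega
        rw [this]
        rfl
      have hnd' : (s ++ [c]).Nodup := by simp [List.nodup_append, hnd]; exact fun a ha he => hc (he ▸ ha)
      have hcode' : ∀ x ∈ s ++ [c], x.toNat ≤ 126 := by
        intro x hx
        rcases List.mem_append.mp hx with h | h
        · exact hcode x h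
        · simp at h; rw [h]; exact hcc
      have hseen : pvSeen s (c :: r) = pvSeen (s ++ [c]) r := by
        show pvSeen (PySem.Set.add s c) r = pvSeen (s ++ [c]) r
        rw [pvSet_add_not_mem hc]
      rw [hstep, hseen, ih (s ++ [c]) (cw ++ pvVal s.length) hnd' hcode' hcl]
      obtain ⟨t, ht⟩ := pvSeen_prefix r (s ++ [c])
      have hcm : c ∈ s ++ [c] := List.mem_append.mpr (Or.inr (by simp))
      rw [List.map_cons, str_join_cons, ← ht, get?_pvMap_prefix hcm t 0, hval]
      simp [String.append_assoc]

-- ===== B-side lemmas =====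

-- lookup in pvMap by first index
theorem pv_idxOf_append {c : Char} {p : List Char} (h : c ∉ p) (t : List Char) :
    (p ++ c :: t).idxOf c = p.length := by
  induction p with
  | nil => simp
  | cons d r ih =>
    have hd : d ≠ c := fun he => h (he ▸ List.mem_cons_self)
    have hr : c ∉ r := fun hm => h (List.mem_cons_of_mem d hm)
    rw [List.cons_append, List.idxOf_cons_ne _ hd, ih hr, List.length_cons]

theorem get?_pvMap_idxOf {c : Char} {s : List Char} (h : c ∈ s) : ∀ k,
    (PySem.Dict.mk (pvMap k s)).get? (String.ofList [c]) = some (pvVal (k + s.idxOf c)) := by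
  induction s with
  | nil => cases h
  | cons d r ih =>
    intro k
    rw [pvMap, PySem.Dict.get?_mk_cons]
    by_cases hd : d = c
    · rw [if_pos ((pvKey_inj d c).mpr hd), hd, List.idxOf_cons_self]
      simp
    · have hm : c ∈ r := by
        rcases List.mem_cons.mp h with h' | h'
        · exact absurd h'.symm hd
        · exact h'
      rw [if_neg (fun hb => hd ((pvKey_inj d c).mp hb)), ih hm (k + 1),
          List.idxOf_cons_ne _ hd,
          show k + (r.idxOf c + 1) = k + 1 + r.idxOf c by omega]

-- B's per-character count equals the index of c in the dedup of the whole word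
theorem pv_rank {c : Char} {cs : List Char} (h : c ∈ cs) :
    (PySem.Set.ofList (cs.take ((PySem.List.index? cs c).getD 0))).length
      = (pvSeen [] cs).idxOf c := by
  obtain ⟨i, hi⟩ := Option.isSome_iff_exists.mp ((PySem.List.index?_isSome_iff cs c).mpr h)
  obtain ⟨u, v, hcs, hlen, hcnp⟩ := (PySem.List.index?_eq_some_iff cs c i).mp hi
  have htake : cs.take ((PySem.List.index? cs c).getD 0) = u := by
    rw [hi, Option.getD_some, ← hlen, hcs, List.take_left]
  rw [htake]
  have hofl : PySem.Set.ofList u = pvSeen [] u := by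
    rw [PySem.Set.ofList_eq_foldl]; rfl
  rw [hofl, hcs, pvSeen_append]
  have hcnp' : c ∉ pvSeen [] u := by
    rw [pvSeen_mem]
    rintro (h' | h')
    · cases h'
    · exact hcnp h'
  have h1 : pvSeen (pvSeen [] u) (c :: v) = pvSeen (pvSeen [] u ++ [c]) v := by
    show pvSeen (PySem.Set.add (pvSeen [] u) c) v = _
    rw [pvSet_add_not_mem hcnp']
  rw [h1]
  obtain ⟨t, ht⟩ := pvSeen_prefix v (pvSeen [] u ++ [c])
  rw [← ht, List.append_assoc, List.singleton_append, pv_idxOf_append hcnp' t]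

-- the dedup list of distinct letters with their index values IS pvMap
theorem pvMap_eq_map (seen : List Char) (hnd : seen.Nodup) :
    ∀ u, (u ++ seen).Nodup →
      seen.map (fun c => (String.ofList [c], pvVal ((u ++ seen).idxOf c)))
        = pvMap u.length seen := by
  induction seen with
  | nil => intro u _; simp [pvMap]
  | cons c r ih =>
    intro u hu
    have hcu : c ∉ u := by
      intro hm
      exact (List.disjoint_of_nodup_append hu) hm List.mem_cons_self
    have hidx : (u ++ c :: r).idxOf c = u.length := pv_idxOf_append hcu r
    have hnd' : r.Nodup := (List.nodup_cons.mp hnd).2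
    have hu' : ((u ++ [c]) ++ r).Nodup := by
      rw [List.append_assoc, List.singleton_append]; exact hu
    have hmapstep : r.map (fun x => (String.ofList [x], pvVal ((u ++ c :: r).idxOf x)))
        = r.map (fun x => (String.ofList [x], pvVal (((u ++ [c]) ++ r).idxOf x))) := by
      apply List.map_congr_left
      intro x _
      rw [List.append_assoc, List.singleton_append]
    rw [List.map_cons, hidx, hmapstep, ih hnd' (u ++ [c]) hu', pvMap]
    congr 2
    simp

-- generic get? on a dict whose items carry a per-key fixed value
theorem get?_mk_mapF {F : Char → String} {c : Char} {s : List Char} (h : c ∈ s) :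
    (PySem.Dict.mk (s.map (fun x => (String.ofList [x], F x)))).get? (String.ofList [c])
      = some (F c) := by
  induction s with
  | nil => cases h
  | cons d r ih =>
    rw [List.map_cons, PySem.Dict.get?_mk_cons]
    by_cases hd : d = c
    · rw [if_pos ((pvKey_inj d c).mpr hd), hd]
    · have hm : c ∈ r := by
        rcases List.mem_cons.mp h with h' | h'
        · exact absurd h'.symm hd
        · exact h'
      rw [if_neg (fun hb => hd ((pvKey_inj d c).mp hb))]
      exact ih hm

theorem get?_mk_mapF_none {F : Char → String} {c : Char} {s : List Char} (h : c ∉ s) :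
    (PySem.Dict.mk (s.map (fun x => (String.ofList [x], F x)))).get? (String.ofList [c])
      = none := by
  induction s with
  | nil => rfl
  | cons d r ih =>
    rw [List.map_cons, PySem.Dict.get?_mk_cons, if_neg, ih (fun hm => h (List.mem_cons_of_mem d hm))]
    intro hb
    exact h (by simp [(pvKey_inj d c).mp hb])

-- inserting a key that is already present with its own fixed value changes nothing
theorem pv_insertF_mem {F : Char → String} {c : Char} {s : List Char} (h : c ∈ s) :
    (PySem.Dict.mk (s.map (fun x => (String.ofList [x], F x)))).insert
        (String.ofList [c]) (F c)
      = PySem.Dict.mk (s.map (fun x => (String.ofList [x], F x))) := by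
  have hcont : (PySem.Dict.mk (s.map (fun x => (String.ofList [x], F x)))).contains
      (String.ofList [c]) = true := by
    rw [PySem.Dict.contains_eq_isSome_get?, get?_mk_mapF h]; rfl
  apply PySem.Dict.ext
  rw [PySem.Dict.items_insert_of_contains _ _ hcont]
  show (s.map (fun x => (String.ofList [x], F x))).map _ = s.map _
  rw [List.map_map]
  apply List.map_congr_left
  intro a _
  simp only [Function.comp]
  by_cases hb : (String.ofList [a] == String.ofList [c]) = true
  · have : a = c := (pvKey_inj a c).mp hb
    simp [hb, this]
  · simp [hb]

-- inserting a fresh key appends its entry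
theorem pv_insertF_not_mem {F : Char → String} {c : Char} {s : List Char} (h : c ∉ s) :
    (PySem.Dict.mk (s.map (fun x => (String.ofList [x], F x)))).insert
        (String.ofList [c]) (F c)
      = PySem.Dict.mk ((s ++ [c]).map (fun x => (String.ofList [x], F x))) := by
  have hcont : (PySem.Dict.mk (s.map (fun x => (String.ofList [x], F x)))).contains
      (String.ofList [c]) = false := by
    rw [PySem.Dict.contains_eq_isSome_get?, get?_mk_mapF_none h]; rfl
  apply PySem.Dict.ext
  rw [PySem.Dict.items_insert_of_not_contains _ _ hcont]
  simp

-- the zip-insert fold of B builds the dedup-keyed dict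
theorem pv_zip_fold (g : Char → Char) (l : List Char) : ∀ s : List Char,
    (l.zip (l.map g)).foldl
        (fun (d : PySem.Dict String String) p =>
          d.insert (String.ofList [p.1]) (String.ofList [p.2]))
        (PySem.Dict.mk (s.map (fun x => (String.ofList [x], String.ofList [g x]))))
      = PySem.Dict.mk ((pvSeen s l).map (fun x => (String.ofList [x], String.ofList [g x]))) := by
  induction l with
  | nil => intro s; rfl
  | cons c r ih =>
    intro s
    rw [List.map_cons, List.zip_cons_cons, List.foldl_cons]
    by_cases hc : c ∈ s
    · rw [show ((PySem.Dict.mk (s.map (fun x => (String.ofList [x], String.ofList [g x])))).insert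
            (String.ofList [(c, g c).1]) (String.ofList [(c, g c).2]))
          = (PySem.Dict.mk (s.map (fun x => (String.ofList [x], String.ofList [g x])))).insert
            (String.ofList [c]) ((fun x => String.ofList [g x]) c) from rfl,
          pv_insertF_mem hc]
      have hseen : pvSeen s (c :: r) = pvSeen s r := by
        show pvSeen (PySem.Set.add s c) r = pvSeen s r
        rw [pvSet_add_mem hc]
      rw [hseen]
      exact ih s
    · rw [show ((PySem.Dict.mk (s.map (fun x => (String.ofList [x], String.ofList [g x])))).insert
            (String.ofList [(c, g c).1]) (String.ofList [(c, g c).2]))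
          = (PySem.Dict.mk (s.map (fun x => (String.ofList [x], String.ofList [g x])))).insert
            (String.ofList [c]) ((fun x => String.ofList [g x]) c) from rfl,
          pv_insertF_not_mem hc]
      have hseen : pvSeen s (c :: r) = pvSeen (s ++ [c]) r := by
        show pvSeen (PySem.Set.add s c) r = pvSeen (s ++ [c]) r
        rw [pvSet_add_not_mem hc]
      rw [hseen]
      exact ih (s ++ [c])

-- toList of a join of singleton strings
theorem pv_toList_join (f : Char → Char) (l : List Char) :
    (PySem.Str.join "" (l.map (fun c => String.ofList [f c]))).toList = l.map f := by
  induction l with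
  | nil => rfl
  | cons c r ih =>
    rw [List.map_cons, str_join_cons, String.toList_append]
    simp only [String.toList_ofList]
    rw [ih, List.map_cons, List.singleton_append]

-- ===== VERDICT (by name: the statement is the Claim_ definition above) =====
theorem common_form_spec : Claim_equal_common_form := by
  intro word hdom
  show common_form word = common_form_alt word
  have hcodes : ∀ c ∈ word.toList, c.toNat ≤ 126 := by
    simp only [Dom_common_form, pvDomStr, List.all_eq_true] at hdom
    intro c hc
    have h := hdom c hc
    simp [pvDomChar] at h
    omega
  -- names for the pieces
  set cs := word.toList with hcs
  have hseen_nd : (pvSeen [] cs).Nodup := by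
    have : pvSeen [] cs = PySem.Set.ofList cs := by
      rw [PySem.Set.ofList_eq_foldl]; rfl
    rw [this]
    exact PySem.Set.nodup_ofList cs
  -- B's per-character emitted character
  have hBchar : ∀ c ∈ cs,
      String.ofList [Char.ofNat (65 + (PySem.Set.ofList
          (cs.take ((PySem.List.index? cs c).getD 0))).length)]
        = pvVal ((pvSeen [] cs).idxOf c) := by
    intro c hc
    rw [pv_rank hc, pvVal]
  -- A side
  have hloop := pv_loop cs [] "" List.nodup_nil (by intro c h; cases h) hcodes
  rw [common_form_eq_foldl]
  unfold common_form_alt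
  rw [← hcs]
  have hinit : (('A' : Char), (PySem.Dict.empty : PySem.Dict String String), ("" : String))
      = (Char.ofNat (65 + ([] : List Char).length), PySem.Dict.mk (pvMap 0 []), ("" : String)) := rfl
  rw [hinit, hloop]
  dsimp only
  rw [String.empty_append]
  -- the two common_word strings agree character by character
  have hcw : cs.map (fun c =>
        ((PySem.Dict.mk (pvMap 0 (pvSeen [] cs))).get? (String.ofList [c])).getD "")
      = cs.map (fun c => String.ofList [Char.ofNat (65 + (PySem.Set.ofList
          (cs.take ((PySem.List.index? cs c).getD 0))).length)]) := by
    apply List.map_congr_left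
    intro c hc
    have hmem : c ∈ pvSeen [] cs := (pvSeen_mem cs []).mpr (Or.inr hc)
    rw [get?_pvMap_idxOf hmem 0, Option.getD_some, hBchar c hc, Nat.zero_add]
  rw [hcw]
  -- the two letter maps agree
  congr 1
  have hzipchars : (PySem.Str.join "" (cs.map (fun c => String.ofList [Char.ofNat
        (65 + (PySem.Set.ofList (cs.take ((PySem.List.index? cs c).getD 0))).length)]))).toList
      = cs.map (fun c => Char.ofNat
        (65 + (PySem.Set.ofList (cs.take ((PySem.List.index? cs c).getD 0))).length)) :=
    pv_toList_join _ cs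
  rw [hzipchars]
  have hempty : (PySem.Dict.empty : PySem.Dict String String)
      = PySem.Dict.mk (([] : List Char).map (fun x => (String.ofList [x], String.ofList
          [Char.ofNat (65 + (PySem.Set.ofList (cs.take ((PySem.List.index? cs x).getD 0))).length)]))) := rfl
  rw [hempty, pv_zip_fold (fun c => Char.ofNat
      (65 + (PySem.Set.ofList (cs.take ((PySem.List.index? cs c).getD 0))).length)) cs []]
  -- the resulting items list is pvMap
  have hFmap : (pvSeen [] cs).map (fun x => (String.ofList [x], String.ofList
        [Char.ofNat (65 + (PySem.Set.ofList (cs.take ((PySem.List.index? cs x).getD 0))).length)]))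
      = (pvSeen [] cs).map (fun x => (String.ofList [x], pvVal ((pvSeen [] cs).idxOf x))) := by
    apply List.map_congr_left
    intro x hx
    have hxcs : x ∈ cs := by
      rcases (pvSeen_mem cs []).mp hx with h | h
      · cases h
      · exact h
    rw [hBchar x hxcs]
  have hpvmap : (pvSeen [] cs).map (fun x => (String.ofList [x], pvVal ((pvSeen [] cs).idxOf x)))
      = pvMap 0 (pvSeen [] cs) := by
    have := pvMap_eq_map (pvSeen [] cs) hseen_nd [] (by simpa using hseen_nd)
    simpa using this
  show pvMap 0 (pvSeen [] cs) = (PySem.Dict.mk ((pvSeen [] cs).map _)).items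
  rw [hFmap, hpvmap]
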